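-- pv_equiv track=rewrite | github.com/dwminer/machine-poetry | wordRhyme.py | mam
-- ===== SOURCE A (Python) =====
-- def mam(start, length):
--     array = []
--     i = 0
--     while i < length:
--         array.append(start)
--         start = 1 - start
--         i += 1
--     return array
-- ===== SOURCE B (Python) =====
-- def mam(start, length):
--     return ([start, 1 - start] * ((length + 1) // 2))[:length]
-- ===== Notes on version B (the rewrite author's own statement) =====
-- stated objective: idiomatic
-- what changed: Replaces the stateful append-and-flip while loop by building the two-element repeating block once, replicating it with list multiplication and slicing to the requested length.
import Mathlib
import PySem

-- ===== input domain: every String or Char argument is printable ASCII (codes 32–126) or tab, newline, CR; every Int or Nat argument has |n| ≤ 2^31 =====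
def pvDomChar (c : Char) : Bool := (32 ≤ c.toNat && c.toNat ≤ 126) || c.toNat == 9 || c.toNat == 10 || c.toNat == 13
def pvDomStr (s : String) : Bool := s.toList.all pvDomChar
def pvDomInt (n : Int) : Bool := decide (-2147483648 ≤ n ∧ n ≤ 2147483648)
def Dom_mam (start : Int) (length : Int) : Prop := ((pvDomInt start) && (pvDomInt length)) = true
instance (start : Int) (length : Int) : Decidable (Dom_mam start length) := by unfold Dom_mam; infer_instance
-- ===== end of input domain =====

-- B builds the alternating list from a replicated two-element block instead of A's
-- append-and-flip while loop; objective: idiomatic, same cost.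

-- ===== PORT A =====
-- the while loop: append start, flip start, bump i
def mamLoop (start : Int) (i : Int) (length : Int) (array : List Int) : List Int :=
  if i < length then mamLoop (1 - start) (i + 1) length (array ++ [start]) else array
termination_by (length - i).toNat
decreasing_by omega

def mam (start : Int) (length : Int) : List Int :=
  mamLoop start 0 length []

-- ===== PORT B =====
-- ([start, 1 - start] * ((length + 1) // 2))[:length]
def mam_alt (start : Int) (length : Int) : List Int :=
  PySem.List.slice
    ((List.replicate ((PySem.Int.floordiv (length + 1) 2).toNat) [start, 1 - start]).flatten)
    none (some length)

-- ===== PRECONDITION & SPEC =====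
def Spec_mam (start : Int) (length : Int) (out : List Int) : Prop := out = mam_alt start length
instance (start : Int) (length : Int) (out : List Int) : Decidable (Spec_mam start length out) := by unfold Spec_mam; infer_instance

-- ===== CLAIM (what is proved, stated in full; the proofs are below) =====
def Claim_equal_mam : Prop := ∀ (start : Int) (length : Int), Dom_mam start length → Spec_mam start length (mam start length)

-- ===== LEMMAS AND PROOFS =====

-- the canonical alternating pattern of n elements
def pat (s : Int) : Nat → List Int
  | 0 => []
  | n + 1 => s :: pat (1 - s) n

theorem mamLoop_eq (n : Nat) : ∀ (s i length : Int) (arr : List Int),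
    (length - i).toNat = n → mamLoop s i length arr = arr ++ pat s n := by
  induction n with
  | zero =>
    intro s i length arr h
    rw [mamLoop]
    simp [pat]
    omega
  | succ n ih =>
    intro s i length arr h
    rw [mamLoop]
    rw [if_pos (by omega)]
    rw [ih (1 - s) (i + 1) length _ (by omega)]
    simp [pat]

theorem pat_eq_take (n : Nat) : ∀ s : Int,
    (List.replicate ((n + 1) / 2) [s, 1 - s]).flatten.take n = pat s n := by
  induction n using Nat.strong_induction_on with
  | _ n ih =>
    intro s
    match n with
    | 0 => simp [pat]
    | 1 => simp [pat]
    | n + 2 =>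
      have h2 : (n + 2 + 1) / 2 = (n + 1) / 2 + 1 := by omega
      rw [h2, List.replicate_succ, List.flatten_cons]
      have hs : (1 : Int) - (1 - s) = s := by ring
      simp only [List.cons_append, List.nil_append, List.take_succ_cons, pat, hs]
      exact congrArg (s :: ·) (congrArg ((1 - s) :: ·) (ih n (by omega) s))

theorem mam_eq_alt (start length : Int) : mam start length = mam_alt start length := by
  unfold mam mam_alt
  rw [mamLoop_eq (length - 0).toNat start 0 length [] rfl]
  rcases (show 0 < length ∨ length ≤ 0 by omega) with hpos | hle
  · rw [PySem.List.slice_to _ (by omega)]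
    have hfd : (PySem.Int.floordiv (length + 1) 2).toNat = (length.toNat + 1) / 2 := by
      rw [PySem.Int.floordiv_eq_ediv_of_pos (by omega)]
      omega
    have h1 : (length - 0).toNat = length.toNat := by omega
    rw [h1, hfd]
    simp [pat_eq_take length.toNat start]
  · have h0 : (length - 0).toNat = 0 := by omega
    have hfd : (PySem.Int.floordiv (length + 1) 2).toNat = 0 := by
      rw [PySem.Int.floordiv_eq_ediv_of_pos (by omega)]
      omega
    rw [h0, hfd]
    simp [pat, PySem.List.slice]

-- ===== VERDICT (by name: the statement is the Claim_ definition above) =====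
theorem mam_spec : Claim_equal_mam := by
  intro s l _
  exact mam_eq_alt s l
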